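-- pv_equiv track=rewrite | github.com/rockstaedt/ses_opt | seqsuc/helpers/utilities.py | reset_tuple_key
-- ===== SOURCE A (Python) =====
-- from typing import Dict
--
-- def reset_tuple_key(dic: Dict) -> Dict:
--     """
--     This function resets a dictionary with a tuple key (storage_type, hour)
--     to a dictionary with storage types as keys containing a dictionary of
--     hours.
--     """
--     return_dic = {}
--     for key_one, key_two in list(dic.keys()):
--         if key_one in return_dic:
--             return_dic[key_one][key_two] = dic[(key_one, key_two)]
--         else:
--             return_dic[key_one] = {}
--             return_dic[key_one][key_two] = dic[(key_one, key_two)]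
--     return return_dic
-- ===== SOURCE B (Python) =====
-- def reset_tuple_key(dic):
--     """Group-by-rescan: first collect the distinct storage types in
--     first-occurrence order, then build each inner hours-dict by its own scan
--     over the items, keeping only the pairs belonging to that storage type."""
--     firsts = dict.fromkeys(k1 for (k1, _) in dic)
--     return {k1: {k2: v for (a, k2), v in dic.items() if a == k1}
--             for k1 in firsts}
-- ===== Notes on version B (the rewrite author's own statement) =====
-- stated objective: alternative
-- what changed: B replaces A's single-pass accumulation (membership test, lazy inner-dict creation, per-item dict[(k1,k2)] lookup) by a group-by-rescan: it first collects the distinct first keys in order, then builds each inner dict by its own filtered scan over the items.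
import Mathlib
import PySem

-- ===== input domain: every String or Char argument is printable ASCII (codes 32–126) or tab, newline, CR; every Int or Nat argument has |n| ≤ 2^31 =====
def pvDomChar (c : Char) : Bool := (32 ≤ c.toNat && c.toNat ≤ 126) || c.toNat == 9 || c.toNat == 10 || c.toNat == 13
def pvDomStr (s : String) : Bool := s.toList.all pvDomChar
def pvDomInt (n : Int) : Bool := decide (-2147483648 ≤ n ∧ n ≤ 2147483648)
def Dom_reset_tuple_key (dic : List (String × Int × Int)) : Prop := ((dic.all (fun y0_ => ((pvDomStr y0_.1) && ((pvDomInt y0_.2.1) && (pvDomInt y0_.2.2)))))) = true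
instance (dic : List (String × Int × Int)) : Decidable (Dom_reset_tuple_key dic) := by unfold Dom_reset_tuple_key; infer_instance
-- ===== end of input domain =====

-- B is a group-by-rescan: collect distinct first keys in order, then build each
-- inner dict by its own filtered scan over the items (objective: alternative).

-- ===== PORT A =====
-- dic[(key_one, key_two)]: first-match lookup in the dict; under Pre_ the key is
-- always present (it comes from dic's own keys), so the 0 default is never returned.
def pvLookupA (dic : List (String × Int × Int)) (k : String × Int) : Int :=
  ((PySem.Dict.mk (dic.map fun z => ((z.1, z.2.1), z.2.2))).get? k).getD 0

def reset_tuple_key (dic : List (String × Int × Int)) : List (String × List (Int × Int)) :=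
  let return_dic : PySem.Dict String (PySem.Dict Int Int) :=
    dic.foldl (fun rd y =>
      if PySem.Dict.contains rd y.1 then
        rd.insert y.1 ((rd.getD y.1 PySem.Dict.empty).insert y.2.1 (pvLookupA dic (y.1, y.2.1)))
      else
        let rd2 := rd.insert y.1 PySem.Dict.empty
        rd2.insert y.1 ((rd2.getD y.1 PySem.Dict.empty).insert y.2.1 (pvLookupA dic (y.1, y.2.1))))
      PySem.Dict.empty
  return_dic.items.map (fun p => (p.1, p.2.items))

-- ===== PORT B =====
-- firsts = dict.fromkeys(k1 for (k1,_) in dic): distinct first keys in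
-- first-occurrence order (= PySem.Set.ofList); the inner comprehension
-- {k2: v for (a,k2),v in dic.items() if a == k1} is Dict.ofList of the
-- filtered, projected item list; the outer comprehension keys are distinct
-- by construction, so the result dict's items are this map.
def reset_tuple_key_alt (dic : List (String × Int × Int)) : List (String × List (Int × Int)) :=
  let firsts := PySem.Set.ofList (dic.map (fun y => y.1))
  firsts.map (fun k1 =>
    (k1, (PySem.Dict.ofList ((dic.filter (fun y => y.1 == k1)).map
            (fun y => (y.2.1, y.2.2)))).items))

-- ===== PRECONDITION & SPEC =====
-- Pre_ excludes association lists with duplicate (storage_type, hour) keys: those cannot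
-- represent the Python dict A receives, and on them A's first-match lookup and B's
-- last-wins comprehension are both accidental assoc-list readings.
def Pre_reset_tuple_key (dic : List (String × Int × Int)) : Prop :=
  (dic.map (fun y => (y.1, y.2.1))).Nodup
instance (dic : List (String × Int × Int)) : Decidable (Pre_reset_tuple_key dic) := by
  unfold Pre_reset_tuple_key; infer_instance

def pvWitness_reset_tuple_key : (List (String × Int × Int)) :=
  [("a", 1, 5), ("a", 2, 6), ("b", 1, 7)]

def Spec_reset_tuple_key (dic : List (String × Int × Int)) (out : List (String × List (Int × Int))) : Prop := out = reset_tuple_key_alt dic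
instance (dic : List (String × Int × Int)) (out : List (String × List (Int × Int))) : Decidable (Spec_reset_tuple_key dic out) := by unfold Spec_reset_tuple_key; infer_instance

-- ===== CLAIM (what is proved, stated in full; the proofs are below) =====
def Claim_equal_reset_tuple_key : Prop := ∀ (dic : List (String × Int × Int)), Dom_reset_tuple_key dic → Pre_reset_tuple_key dic → Spec_reset_tuple_key dic (reset_tuple_key dic)

-- ===== LEMMAS AND PROOFS =====

-- the simplified step A's loop body amounts to (value taken from the item itself)
def pvStep0 (rd : PySem.Dict String (PySem.Dict Int Int)) (y : String × Int × Int) :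
    PySem.Dict String (PySem.Dict Int Int) :=
  rd.insert y.1 ((rd.getD y.1 PySem.Dict.empty).insert y.2.1 y.2.2)

-- under Pre_, looking up an element's own key returns its own value
theorem pvLookupA_self (dic : List (String × Int × Int)) (h : Pre_reset_tuple_key dic)
    (y : String × Int × Int) (hy : y ∈ dic) : pvLookupA dic (y.1, y.2.1) = y.2.2 := by
  have hk : ((y.1, y.2.1), y.2.2) ∈ (PySem.Dict.mk (dic.map fun z => ((z.1, z.2.1), z.2.2))).items := by
    exact List.mem_map_of_mem hy
  have hnd : (PySem.Dict.mk (dic.map fun z => ((z.1, z.2.1), z.2.2))).keys.Nodup := by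
    simpa [PySem.Dict.keys, List.map_map, Function.comp] using h
  have := PySem.Dict.get?_of_mem_items _ hk hnd
  simp [pvLookupA, this]

-- A's loop body (branch on membership, fresh-key branch) collapses to pvStep0
theorem pvStepA_eq (dic : List (String × Int × Int)) (h : Pre_reset_tuple_key dic)
    (rd : PySem.Dict String (PySem.Dict Int Int)) (y : String × Int × Int) (hy : y ∈ dic) :
    (if PySem.Dict.contains rd y.1 then
        rd.insert y.1 ((rd.getD y.1 PySem.Dict.empty).insert y.2.1 (pvLookupA dic (y.1, y.2.1)))
      else
        let rd2 := rd.insert y.1 PySem.Dict.empty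
        rd2.insert y.1 ((rd2.getD y.1 PySem.Dict.empty).insert y.2.1 (pvLookupA dic (y.1, y.2.1))))
      = pvStep0 rd y := by
  rw [pvLookupA_self dic h y hy]
  unfold pvStep0
  split_ifs with hc
  · rfl
  · have h0 : rd.getD y.1 PySem.Dict.empty = PySem.Dict.empty :=
      PySem.Dict.getD_of_not_contains rd PySem.Dict.empty (by simpa using hc)
    simp [PySem.Dict.insert_insert_self, PySem.Dict.getD_insert_self, h0]

-- the group a key c accumulates through the loop is the filtered sub-list folded in
theorem pvGetD_fold (l : List (String × Int × Int)) (d : PySem.Dict String (PySem.Dict Int Int))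
    (c : String) :
    (l.foldl pvStep0 d).getD c PySem.Dict.empty
      = (l.filter (fun y => y.1 == c)).foldl
          (fun dd y => dd.insert y.2.1 y.2.2) (d.getD c PySem.Dict.empty) := by
  induction l generalizing d with
  | nil => rfl
  | cons y t ih =>
    by_cases hc : y.1 = c
    · simp [List.foldl_cons, hc, ih, pvStep0, PySem.Dict.getD_insert_self]
    · have h0 := PySem.Dict.getD_insert_of_ne d
        ((d.getD y.1 PySem.Dict.empty).insert y.2.1 y.2.2) PySem.Dict.empty
        (k := y.1) (k' := c) (Ne.symm hc)
      simp [List.foldl_cons, hc, ih, pvStep0, h0]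

-- ===== VERDICT (by name: the statement is the Claim_ definition above) =====
theorem reset_tuple_key_spec : Claim_equal_reset_tuple_key := by
  intro dic _ hpre
  unfold Spec_reset_tuple_key reset_tuple_key reset_tuple_key_alt
  have hfold : dic.foldl (fun rd y =>
      if PySem.Dict.contains rd y.1 then
        rd.insert y.1 ((rd.getD y.1 PySem.Dict.empty).insert y.2.1 (pvLookupA dic (y.1, y.2.1)))
      else
        let rd2 := rd.insert y.1 PySem.Dict.empty
        rd2.insert y.1 ((rd2.getD y.1 PySem.Dict.empty).insert y.2.1 (pvLookupA dic (y.1, y.2.1))))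
      PySem.Dict.empty = dic.foldl pvStep0 PySem.Dict.empty := by
    apply PySem.List.foldl_congr_mem
    intro rd y hy
    exact pvStepA_eq dic hpre rd y hy
  rw [hfold]
  have hnd : (dic.foldl pvStep0 PySem.Dict.empty).keys.Nodup :=
    PySem.Dict.nodup_keys_foldl_insert_key dic (fun y => y.1)
      (fun rd y => (rd.getD y.1 PySem.Dict.empty).insert y.2.1 y.2.2)
      PySem.Dict.empty PySem.Dict.nodup_keys_empty
  dsimp only
  rw [PySem.Dict.items_eq_map_keys _ hnd PySem.Dict.empty]
  have hkeys : (dic.foldl pvStep0 PySem.Dict.empty).keys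
      = PySem.Set.ofList (dic.map (fun y => y.1)) := by
    have h1 := PySem.Dict.keys_foldl_insert_key (l := dic) (key := fun y => y.1)
      (f := fun rd y => (rd.getD y.1 PySem.Dict.empty).insert y.2.1 y.2.2)
      (d := (PySem.Dict.empty : PySem.Dict String (PySem.Dict Int Int)))
    simpa [PySem.Dict.keys_empty, PySem.Set.update_nil_left] using h1
  rw [hkeys, List.map_map]
  apply List.map_congr_left
  intro c _
  simp only [Function.comp]
  rw [pvGetD_fold dic PySem.Dict.empty c, PySem.Dict.getD_empty]
  congr 1
  simp [PySem.Dict.ofList, PySem.Dict.update, List.foldl_map]
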